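-- pv_equiv track=rewrite | github.com/VerticalResearchGroup/upcycle | upcycle/model/noc.py | trace_route
-- ===== SOURCE A (Python) =====
-- def trace_route(src : tuple[int, int], dst : tuple[int, int]):
--     r, c = src
--     route = []
--     prev = (r, c)
--
--     while c != dst[1]:
--         c += 1 if c < dst[1] else -1
--         cur = (r, c)
--         route.append((prev, cur))
--         prev = cur
--
--     while r != dst[0]:
--         r += 1 if r < dst[0] else -1
--         cur = (r, c)
--         route.append((prev, cur))
--         prev = cur
--
--     return route
-- ===== SOURCE B (Python) =====
-- def trace_route(src, dst):
--     r0, c0 = src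
--     r1, c1 = dst
--     dc = abs(c1 - c0)
--     dr = abs(r1 - r0)
--     cs = 1 if c1 >= c0 else -1
--     rs = 1 if r1 >= r0 else -1
--
--     def node(k):
--         # closed-form k-th cell of the route: column leg first, then row leg
--         if k <= dc:
--             return (r0, c0 + cs * k)
--         return (r0 + rs * (k - dc), c1)
--
--     return [(node(k), node(k + 1)) for k in range(dc + dr)]
-- ===== Notes on version B (the rewrite author's own statement) =====
-- stated objective: alternative
-- what changed: B replaces A's two stateful while loops (mutating coordinates and threading a prev node) with a closed-form random-access function node(k) giving the k-th cell of the route directly from k, and emits edge k as (node(k), node(k+1)) over range(dc+dr).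
import Mathlib
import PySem

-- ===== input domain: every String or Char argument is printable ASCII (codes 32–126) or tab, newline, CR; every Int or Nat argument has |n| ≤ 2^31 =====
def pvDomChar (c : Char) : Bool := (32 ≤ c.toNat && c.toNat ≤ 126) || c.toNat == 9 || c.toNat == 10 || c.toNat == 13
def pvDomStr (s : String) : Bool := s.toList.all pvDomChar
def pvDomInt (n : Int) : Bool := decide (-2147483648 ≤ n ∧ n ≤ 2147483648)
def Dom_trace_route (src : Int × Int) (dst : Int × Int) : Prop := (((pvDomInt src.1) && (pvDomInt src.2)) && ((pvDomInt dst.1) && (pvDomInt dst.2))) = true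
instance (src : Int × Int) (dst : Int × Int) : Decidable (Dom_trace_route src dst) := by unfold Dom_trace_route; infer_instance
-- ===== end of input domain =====

-- B computes the k-th route cell by a closed-form function node(k) and emits edge k as
-- (node k, node (k+1)) over an index range, instead of A's two stateful while loops.
-- Return values proved equal on all inputs.

-- ===== PORT A =====
-- first while loop of A: walk the column coordinate toward dc, appending edges;
-- returns (route, final c, final prev)
def colLoop (r dc : Int) (c : Int) (prev : Int × Int) :
    List ((Int × Int) × (Int × Int)) × Int × (Int × Int) :=
  if c = dc then ([], c, prev)
  else
    let c' := c + (if c < dc then 1 else -1)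
    let cur := (r, c')
    let rest := colLoop r dc c' cur
    ((prev, cur) :: rest.1, rest.2.1, rest.2.2)
termination_by (dc - c).natAbs
decreasing_by
  split <;> omega

-- second while loop of A: walk the row coordinate toward dr with column c fixed
def rowLoop (dr c : Int) (r : Int) (prev : Int × Int) :
    List ((Int × Int) × (Int × Int)) × Int × (Int × Int) :=
  if r = dr then ([], r, prev)
  else
    let r' := r + (if r < dr then 1 else -1)
    let cur := (r', c)
    let rest := rowLoop dr c r' cur
    ((prev, cur) :: rest.1, rest.2.1, rest.2.2)
termination_by (dr - r).natAbs
decreasing_by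
  split <;> omega

def trace_route (src : Int × Int) (dst : Int × Int) : List ((Int × Int) × (Int × Int)) :=
  let r := src.1
  let c := src.2
  let prev := (r, c)
  let s1 := colLoop r dst.2 c prev
  let s2 := rowLoop dst.1 s1.2.1 r s1.2.2
  s1.1 ++ s2.1

-- ===== PORT B =====
def trace_route_alt (src : Int × Int) (dst : Int × Int) : List ((Int × Int) × (Int × Int)) :=
  let r0 := src.1
  let c0 := src.2
  let r1 := dst.1
  let c1 := dst.2
  let dc := |c1 - c0|
  let dr := |r1 - r0|
  let cs : Int := if c0 ≤ c1 then 1 else -1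
  let rs : Int := if r0 ≤ r1 then 1 else -1
  let node : Int → Int × Int := fun k =>
    if k ≤ dc then (r0, c0 + cs * k) else (r0 + rs * (k - dc), c1)
  (PySem.List.pyRange 0 (dc + dr) 1).map (fun k => (node k, node (k + 1)))

-- ===== PRECONDITION & SPEC =====
def Spec_trace_route (src : Int × Int) (dst : Int × Int) (out : List ((Int × Int) × (Int × Int))) : Prop := out = trace_route_alt src dst
instance (src : Int × Int) (dst : Int × Int) (out : List ((Int × Int) × (Int × Int))) : Decidable (Spec_trace_route src dst out) := by unfold Spec_trace_route; infer_instance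

-- ===== CLAIM (what is proved, stated in full; the proofs are below) =====
def Claim_equal_trace_route : Prop := ∀ (src : Int × Int) (dst : Int × Int), Dom_trace_route src dst → Spec_trace_route src dst (trace_route src dst)

-- ===== LEMMAS AND PROOFS =====

-- canonical consecutive-pairs function, used to relate both ports
def edges : List (Int × Int) → List ((Int × Int) × (Int × Int))
  | [] => []
  | [_] => []
  | a :: b :: t => (a, b) :: edges (b :: t)

lemma edges_split : ∀ (xs : List (Int × Int)) (a : Int × Int) (ys : List (Int × Int)),
    edges (xs ++ a :: ys) = edges (xs ++ [a]) ++ edges (a :: ys)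
  | [], a, ys => by simp [edges]
  | [x], a, ys => by
      show (x, a) :: edges (a :: ys) = ((x, a) :: edges [a]) ++ edges (a :: ys)
      simp [edges]
  | x :: x' :: xs, a, ys => by
      show (x, x') :: edges (x' :: xs ++ a :: ys)
        = ((x, x') :: edges (x' :: xs ++ [a])) ++ edges (a :: ys)
      rw [edges_split (x' :: xs) a ys]
      rfl

lemma pyRange_neg_one_pred (a b : Int) (h : b ≤ a) :
    PySem.List.pyRange a (b - 1) (-1) = PySem.List.pyRange a b (-1) ++ [b] := by
  rw [PySem.List.pyRange_neg_one_eq_reverse, PySem.List.pyRange_neg_one_eq_reverse]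
  have : b - 1 + 1 = b := by omega
  rw [this]
  rw [PySem.List.pyRange_one_cons (show b < a + 1 by omega)]
  simp

lemma colLoop_up (r dc : Int) : ∀ (n : ℕ) (c : Int), c ≤ dc → (dc - c).toNat = n →
    colLoop r dc c (r, c)
      = (edges ((PySem.List.pyRange c (dc + 1) 1).map (fun x => (r, x))), dc, (r, dc))
  | 0, c, h, hn => by
      have hc : c = dc := by omega
      subst hc
      rw [colLoop.eq_def, PySem.List.pyRange_one_singleton]
      simp [edges]
  | n + 1, c, h, hn => by
      have hlt : c < dc := by omega
      rw [colLoop.eq_def]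
      simp only [if_neg (by omega : ¬ c = dc), if_pos hlt]
      rw [colLoop_up r dc n (c + 1) (by omega) (by omega)]
      rw [PySem.List.pyRange_one_cons (show c < dc + 1 by omega),
          PySem.List.pyRange_one_cons (show c + 1 < dc + 1 by omega)]
      simp [edges]

lemma colLoop_down (r dc : Int) : ∀ (n : ℕ) (c : Int), dc ≤ c → (c - dc).toNat = n →
    colLoop r dc c (r, c)
      = (edges ((PySem.List.pyRange c (dc - 1) (-1)).map (fun x => (r, x))), dc, (r, dc))
  | 0, c, h, hn => by
      have hc : c = dc := by omega
      subst hc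
      rw [colLoop.eq_def, pyRange_neg_one_pred c c le_rfl, PySem.List.pyRange_neg_one_eq_nil (le_refl c)]
      simp [edges]
  | n + 1, c, h, hn => by
      have hlt : dc < c := by omega
      rw [colLoop.eq_def]
      simp only [if_neg (by omega : ¬ c = dc), if_neg (by omega : ¬ c < dc)]
      rw [colLoop_down r dc n (c + -1) (by omega) (by omega)]
      have : c + -1 = c - 1 := by omega
      rw [this]
      rw [PySem.List.pyRange_neg_one_cons (show dc - 1 < c by omega),
          PySem.List.pyRange_neg_one_cons (show dc - 1 < c - 1 by omega)]
      simp [edges]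

lemma rowLoop_up (dr c : Int) : ∀ (n : ℕ) (r : Int), r ≤ dr → (dr - r).toNat = n →
    rowLoop dr c r (r, c)
      = (edges ((PySem.List.pyRange r (dr + 1) 1).map (fun x => (x, c))), dr, (dr, c))
  | 0, r, h, hn => by
      have hr : r = dr := by omega
      subst hr
      rw [rowLoop.eq_def, PySem.List.pyRange_one_singleton]
      simp [edges]
  | n + 1, r, h, hn => by
      have hlt : r < dr := by omega
      rw [rowLoop.eq_def]
      simp only [if_neg (by omega : ¬ r = dr), if_pos hlt]
      rw [rowLoop_up dr c n (r + 1) (by omega) (by omega)]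
      rw [PySem.List.pyRange_one_cons (show r < dr + 1 by omega),
          PySem.List.pyRange_one_cons (show r + 1 < dr + 1 by omega)]
      simp [edges]

lemma rowLoop_down (dr c : Int) : ∀ (n : ℕ) (r : Int), dr ≤ r → (r - dr).toNat = n →
    rowLoop dr c r (r, c)
      = (edges ((PySem.List.pyRange r (dr - 1) (-1)).map (fun x => (x, c))), dr, (dr, c))
  | 0, r, h, hn => by
      have hr : r = dr := by omega
      subst hr
      rw [rowLoop.eq_def, pyRange_neg_one_pred r r le_rfl, PySem.List.pyRange_neg_one_eq_nil (le_refl r)]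
      simp [edges]
  | n + 1, r, h, hn => by
      have hlt : dr < r := by omega
      rw [rowLoop.eq_def]
      simp only [if_neg (by omega : ¬ r = dr), if_neg (by omega : ¬ r < dr)]
      rw [rowLoop_down dr c n (r + -1) (by omega) (by omega)]
      have : r + -1 = r - 1 := by omega
      rw [this]
      rw [PySem.List.pyRange_neg_one_cons (show dr - 1 < r by omega),
          PySem.List.pyRange_neg_one_cons (show dr - 1 < r - 1 by omega)]
      simp [edges]

-- the column point list ends in the destination column, split off for edges_split
lemma col_pts_up (r0 c0 c1 : Int) (h : c0 ≤ c1) :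
    (PySem.List.pyRange c0 (c1 + 1) 1).map (fun x => ((r0 : Int), x))
      = ((PySem.List.pyRange c0 c1 1).map (fun x => (r0, x))) ++ [(r0, c1)] := by
  rw [PySem.List.pyRange_one_succ_right h]
  simp

lemma col_pts_down (r0 c0 c1 : Int) (h : c1 ≤ c0) :
    (PySem.List.pyRange c0 (c1 - 1) (-1)).map (fun x => ((r0 : Int), x))
      = ((PySem.List.pyRange c0 c1 (-1)).map (fun x => (r0, x))) ++ [(r0, c1)] := by
  rw [pyRange_neg_one_pred c0 c1 h]
  simp

-- row points seen by A (including the corner) as a cons of the corner and the tail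
lemma row_pts_up (c1 r0 r1 : Int) (h : r0 ≤ r1) :
    (PySem.List.pyRange r0 (r1 + 1) 1).map (fun x => (x, (c1 : Int)))
      = (r0, c1) :: (PySem.List.pyRange (r0 + 1) (r1 + 1) 1).map (fun x => (x, c1)) := by
  rw [PySem.List.pyRange_one_cons (show r0 < r1 + 1 by omega)]
  simp

lemma row_pts_down (c1 r0 r1 : Int) (h : r1 ≤ r0) :
    (PySem.List.pyRange r0 (r1 - 1) (-1)).map (fun x => (x, (c1 : Int)))
      = (r0, c1) :: (PySem.List.pyRange (r0 - 1) (r1 - 1) (-1)).map (fun x => (x, c1)) := by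
  rw [PySem.List.pyRange_neg_one_cons (show r1 - 1 < r0 by omega)]
  simp

-- B's indexed edge map is `edges` of the indexed node list
lemma edges_map_range (g : Int → Int × Int) : ∀ (m : ℕ) (a : Int),
    (PySem.List.pyRange a (a + m) 1).map (fun k => (g k, g (k + 1)))
      = edges ((PySem.List.pyRange a (a + m + 1) 1).map g)
  | 0, a => by
      simp only [Nat.cast_zero, add_zero]
      rw [PySem.List.pyRange_one_eq_nil (le_refl a), PySem.List.pyRange_one_singleton]
      simp [edges]
  | m + 1, a => by
      have h1 : a + ((m : Int) + 1) + 1 = (a + 1) + m + 1 := by omega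
      have h2 : a + ((m : Int) + 1) = (a + 1) + m := by omega
      push_cast
      rw [h1, h2]
      rw [PySem.List.pyRange_one_cons (show a < (a + 1) + m by omega),
          PySem.List.pyRange_one_cons (show a < (a + 1) + m + 1 by omega),
          PySem.List.pyRange_one_cons (show a + 1 < (a + 1) + m + 1 by omega)]
      have ih := edges_map_range g m (a + 1)
      push_cast at ih
      rw [List.map_cons, ih]
      rw [← PySem.List.pyRange_one_cons (show a + 1 < (a + 1) + m + 1 by omega)]
      simp only [List.map_cons]
      rw [PySem.List.pyRange_one_cons (show a + 1 < (a + 1) + m + 1 by omega)]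
      simp [edges]

-- the whole merge: A's two edge lists concatenated = edges of the node list = B
lemma main_eq (src dst : Int × Int) : trace_route src dst = trace_route_alt src dst := by
  obtain ⟨r0, c0⟩ := src
  obtain ⟨r1, c1⟩ := dst
  unfold trace_route trace_route_alt
  simp only []
  -- rewrite B into edges of the node list
  have hdc : (0:Int) ≤ |c1 - c0| := abs_nonneg _
  have hdr : (0:Int) ≤ |r1 - r0| := abs_nonneg _
  set dc := |c1 - c0| with hdcdef
  set dr := |r1 - r0| with hdrdef
  set cs : Int := if c0 ≤ c1 then 1 else -1 with hcs
  set rs : Int := if r0 ≤ r1 then 1 else -1 with hrs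
  set node : Int → Int × Int := fun k =>
    if k ≤ dc then (r0, c0 + cs * k) else (r0 + rs * (k - dc), c1) with hnode
  have hB : (PySem.List.pyRange 0 (dc + dr) 1).map (fun k => (node k, node (k + 1)))
      = edges ((PySem.List.pyRange 0 (dc + dr + 1) 1).map node) := by
    have := edges_map_range node (dc + dr).toNat 0
    have hcast : ((dc + dr).toNat : Int) = dc + dr := by omega
    rw [hcast] at this
    simpa using this
  rw [hB]
  -- split the node list at index dc (the corner) and identify each half
  have hsplit : PySem.List.pyRange 0 (dc + dr + 1) 1
      = PySem.List.pyRange 0 (dc + 1) 1 ++ PySem.List.pyRange (dc + 1) (dc + dr + 1) 1 :=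
    PySem.List.pyRange_one_append 0 (dc + 1) (dc + dr + 1) (by omega) (by omega)
  rw [hsplit, List.map_append]
  have hcolmap : (PySem.List.pyRange 0 (dc + 1) 1).map node
      = (PySem.List.pyRange 0 (dc + 1) 1).map (fun k => (r0, c0 + cs * k)) := by
    apply List.map_congr_left
    intro k hk
    rw [PySem.List.mem_pyRange_one] at hk
    simp only [hnode, if_pos (by omega : k ≤ dc)]
  have hrowmap : (PySem.List.pyRange (dc + 1) (dc + dr + 1) 1).map node
      = (PySem.List.pyRange (dc + 1) (dc + dr + 1) 1).map (fun k => (r0 + rs * (k - dc), c1)) := by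
    apply List.map_congr_left
    intro k hk
    rw [PySem.List.mem_pyRange_one] at hk
    simp only [hnode, if_neg (by omega : ¬ k ≤ dc)]
  rw [hcolmap, hrowmap]
  -- reindex the two halves to A's coordinate ranges, then compare via edges_split
  by_cases hc : c0 ≤ c1 <;> by_cases hr : r0 ≤ r1
  all_goals simp only [hcs, hrs, hdcdef, hdrdef, hc, hr, if_true, if_false]
  · -- column up, row up
    rw [colLoop_up r0 c1 (c1 - c0).toNat c0 hc rfl]
    simp only []
    rw [rowLoop_up r1 c1 (r1 - r0).toNat r0 hr rfl]
    simp only []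
    have habs1 : |c1 - c0| = c1 - c0 := abs_of_nonneg (by omega)
    have habs2 : |r1 - r0| = r1 - r0 := abs_of_nonneg (by omega)
    rw [habs1, habs2]
    have hcol2 : (PySem.List.pyRange 0 (c1 - c0 + 1) 1).map (fun k => ((r0 : Int), c0 + 1 * k))
        = (PySem.List.pyRange c0 (c1 + 1) 1).map (fun x => (r0, x)) := by
      rw [PySem.List.pyRange_one, PySem.List.pyRange_one,
          show (c1 - c0 + 1 - 0).toNat = (c1 + 1 - c0).toNat from by omega]
      simp only [List.map_map]
      refine List.map_congr_left (fun k _ => ?_)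
      simp only [Function.comp_apply]
      rw [Prod.mk.injEq]
      exact ⟨by omega, by omega⟩
    have hrow2 : (PySem.List.pyRange (c1 - c0 + 1) (c1 - c0 + (r1 - r0) + 1) 1).map
          (fun k => (r0 + 1 * (k - (c1 - c0)), (c1 : Int)))
        = (PySem.List.pyRange (r0 + 1) (r1 + 1) 1).map (fun x => (x, c1)) := by
      rw [PySem.List.pyRange_one, PySem.List.pyRange_one,
          show (c1 - c0 + (r1 - r0) + 1 - (c1 - c0 + 1)).toNat = (r1 + 1 - (r0 + 1)).toNat from by omega]
      simp only [List.map_map]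
      refine List.map_congr_left (fun k _ => ?_)
      simp only [Function.comp_apply]
      rw [Prod.mk.injEq]
      exact ⟨by omega, by omega⟩
    rw [hcol2, hrow2, col_pts_up r0 c0 c1 hc, row_pts_up c1 r0 r1 hr, List.append_assoc,
        ← edges_split]
    simp
  · -- column up, row down
    rw [colLoop_up r0 c1 (c1 - c0).toNat c0 hc rfl]
    simp only []
    rw [rowLoop_down r1 c1 (r0 - r1).toNat r0 (by omega) rfl]
    simp only []
    have habs1 : |c1 - c0| = c1 - c0 := abs_of_nonneg (by omega)
    have habs2 : |r1 - r0| = r0 - r1 := by rw [abs_sub_comm]; exact abs_of_nonneg (by omega)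
    rw [habs1, habs2]
    have hcol2 : (PySem.List.pyRange 0 (c1 - c0 + 1) 1).map (fun k => ((r0 : Int), c0 + 1 * k))
        = (PySem.List.pyRange c0 (c1 + 1) 1).map (fun x => (r0, x)) := by
      rw [PySem.List.pyRange_one, PySem.List.pyRange_one,
          show (c1 - c0 + 1 - 0).toNat = (c1 + 1 - c0).toNat from by omega]
      simp only [List.map_map]
      refine List.map_congr_left (fun k _ => ?_)
      simp only [Function.comp_apply]
      rw [Prod.mk.injEq]
      exact ⟨by omega, by omega⟩
    have hrow2 : (PySem.List.pyRange (c1 - c0 + 1) (c1 - c0 + (r0 - r1) + 1) 1).map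
          (fun k => (r0 + -1 * (k - (c1 - c0)), (c1 : Int)))
        = (PySem.List.pyRange (r0 - 1) (r1 - 1) (-1)).map (fun x => (x, c1)) := by
      rw [PySem.List.pyRange_one, PySem.List.pyRange_neg_one,
          show (c1 - c0 + (r0 - r1) + 1 - (c1 - c0 + 1)).toNat = ((r0 - 1) - (r1 - 1)).toNat from by omega]
      simp only [List.map_map]
      refine List.map_congr_left (fun k _ => ?_)
      simp only [Function.comp_apply]
      rw [Prod.mk.injEq]
      exact ⟨by omega, by omega⟩
    rw [hcol2, hrow2, col_pts_up r0 c0 c1 hc, row_pts_down c1 r0 r1 (by omega), List.append_assoc,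
        ← edges_split]
    simp
  · -- column down, row up
    rw [colLoop_down r0 c1 (c0 - c1).toNat c0 (by omega) rfl]
    simp only []
    rw [rowLoop_up r1 c1 (r1 - r0).toNat r0 hr rfl]
    simp only []
    have habs1 : |c1 - c0| = c0 - c1 := by rw [abs_sub_comm]; exact abs_of_nonneg (by omega)
    have habs2 : |r1 - r0| = r1 - r0 := abs_of_nonneg (by omega)
    rw [habs1, habs2]
    have hcol2 : (PySem.List.pyRange 0 (c0 - c1 + 1) 1).map (fun k => ((r0 : Int), c0 + -1 * k))
        = (PySem.List.pyRange c0 (c1 - 1) (-1)).map (fun x => (r0, x)) := by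
      rw [PySem.List.pyRange_one, PySem.List.pyRange_neg_one,
          show (c0 - c1 + 1 - 0).toNat = (c0 - (c1 - 1)).toNat from by omega]
      simp only [List.map_map]
      refine List.map_congr_left (fun k _ => ?_)
      simp only [Function.comp_apply]
      rw [Prod.mk.injEq]
      exact ⟨by omega, by omega⟩
    have hrow2 : (PySem.List.pyRange (c0 - c1 + 1) (c0 - c1 + (r1 - r0) + 1) 1).map
          (fun k => (r0 + 1 * (k - (c0 - c1)), (c1 : Int)))
        = (PySem.List.pyRange (r0 + 1) (r1 + 1) 1).map (fun x => (x, c1)) := by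
      rw [PySem.List.pyRange_one, PySem.List.pyRange_one,
          show (c0 - c1 + (r1 - r0) + 1 - (c0 - c1 + 1)).toNat = (r1 + 1 - (r0 + 1)).toNat from by omega]
      simp only [List.map_map]
      refine List.map_congr_left (fun k _ => ?_)
      simp only [Function.comp_apply]
      rw [Prod.mk.injEq]
      exact ⟨by omega, by omega⟩
    rw [hcol2, hrow2, col_pts_down r0 c0 c1 (by omega), row_pts_up c1 r0 r1 hr, List.append_assoc,
        ← edges_split]
    simp
  · -- column down, row down
    rw [colLoop_down r0 c1 (c0 - c1).toNat c0 (by omega) rfl]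
    simp only []
    rw [rowLoop_down r1 c1 (r0 - r1).toNat r0 (by omega) rfl]
    simp only []
    have habs1 : |c1 - c0| = c0 - c1 := by rw [abs_sub_comm]; exact abs_of_nonneg (by omega)
    have habs2 : |r1 - r0| = r0 - r1 := by rw [abs_sub_comm]; exact abs_of_nonneg (by omega)
    rw [habs1, habs2]
    have hcol2 : (PySem.List.pyRange 0 (c0 - c1 + 1) 1).map (fun k => ((r0 : Int), c0 + -1 * k))
        = (PySem.List.pyRange c0 (c1 - 1) (-1)).map (fun x => (r0, x)) := by
      rw [PySem.List.pyRange_one, PySem.List.pyRange_neg_one,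
          show (c0 - c1 + 1 - 0).toNat = (c0 - (c1 - 1)).toNat from by omega]
      simp only [List.map_map]
      refine List.map_congr_left (fun k _ => ?_)
      simp only [Function.comp_apply]
      rw [Prod.mk.injEq]
      exact ⟨by omega, by omega⟩
    have hrow2 : (PySem.List.pyRange (c0 - c1 + 1) (c0 - c1 + (r0 - r1) + 1) 1).map
          (fun k => (r0 + -1 * (k - (c0 - c1)), (c1 : Int)))
        = (PySem.List.pyRange (r0 - 1) (r1 - 1) (-1)).map (fun x => (x, c1)) := by
      rw [PySem.List.pyRange_one, PySem.List.pyRange_neg_one,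
          show (c0 - c1 + (r0 - r1) + 1 - (c0 - c1 + 1)).toNat = ((r0 - 1) - (r1 - 1)).toNat from by omega]
      simp only [List.map_map]
      refine List.map_congr_left (fun k _ => ?_)
      simp only [Function.comp_apply]
      rw [Prod.mk.injEq]
      exact ⟨by omega, by omega⟩
    rw [hcol2, hrow2, col_pts_down r0 c0 c1 (by omega), row_pts_down c1 r0 r1 (by omega), List.append_assoc,
        ← edges_split]
    simp

-- ===== VERDICT (by name: the statement is the Claim_ definition above) =====
theorem trace_route_spec : Claim_equal_trace_route := by
  intro src dst _
  exact main_eq src dst
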